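-- pv_equiv track=rewrite | github.com/Edwin-Tu/2026-python | weeks/week-03/solutions/1114405014/test/test272.py | convert_quotes
-- ===== SOURCE A (Python) =====
-- def convert_quotes(text):
--     """
--     將普通雙引號轉換為 TeX 格式的有方向性雙引號
--     第一個引號用 `` 代替，第二個用 '' 代替，交替進行
--     """
--     result = []
--     quote_count = 0
--
--     for char in text:
--         if char == '"':
--             if quote_count % 2 == 0:
--                 result.append('``')  # 第一個引號用 ``
--             else:
--                 result.append('\'\'')  # 第二個引號用 ''
--             quote_count += 1
--         else:
--             result.append(char)
--
--     return ''.join(result)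
-- ===== SOURCE B (Python) =====
-- def convert_quotes(text):
--     parts = text.split('"')
--     out = [parts[0]]
--     for i, part in enumerate(parts[1:]):
--         out.append('``' if i % 2 == 0 else "''")
--         out.append(part)
--     return ''.join(out)
-- ===== Notes on version B (the rewrite author's own statement) =====
-- stated objective: faster
-- what changed: B splits the text at double quotes with str.split and rejoins the segments with the two alternating TeX quote separators, replacing A's character-by-character Python loop with a quote counter by C-level split/join.
import Mathlib
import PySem

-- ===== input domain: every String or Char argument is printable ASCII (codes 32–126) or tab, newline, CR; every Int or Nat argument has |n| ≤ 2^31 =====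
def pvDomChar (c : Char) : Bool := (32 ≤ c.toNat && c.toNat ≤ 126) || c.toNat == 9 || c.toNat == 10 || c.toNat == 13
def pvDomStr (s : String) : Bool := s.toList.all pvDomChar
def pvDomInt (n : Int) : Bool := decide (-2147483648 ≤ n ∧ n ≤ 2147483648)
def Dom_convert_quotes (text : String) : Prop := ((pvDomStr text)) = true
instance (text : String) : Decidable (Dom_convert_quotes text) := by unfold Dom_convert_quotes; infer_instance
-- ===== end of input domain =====

-- B replaces A's per-character loop with the idiomatic split-on-'"' and rejoin with alternating `` / '' separators.

-- ===== PORT A =====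
def convert_quotes (text : String) : String :=
  let st := text.toList.foldl (fun (st : List String × Nat) c =>
    if c == '"' then
      (st.1 ++ [if st.2 % 2 == 0 then "``" else "''"], st.2 + 1)
    else
      (st.1 ++ [String.ofList [c]], st.2)) ([], 0)
  PySem.Str.join "" st.1

-- ===== PORT B =====
def convert_quotes_alt (text : String) : String :=
  let parts := (PySem.Str.split? text "\"").getD []
  let out := (PySem.List.enumerate (PySem.List.slice parts (some 1) none)).foldl
      (fun acc p => acc ++ [if p.1 % 2 == 0 then "``" else "''", p.2])
      [(PySem.List.pyGet? parts 0).getD ""]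
  PySem.Str.join "" out

-- ===== PRECONDITION & SPEC =====
def Spec_convert_quotes (text : String) (out : String) : Prop := out = convert_quotes_alt text
instance (text : String) (out : String) : Decidable (Spec_convert_quotes text out) := by unfold Spec_convert_quotes; infer_instance

-- ===== CLAIM (what is proved, stated in full; the proofs are below) =====
def Claim_equal_convert_quotes : Prop := ∀ (text : String), Dom_convert_quotes text → Spec_convert_quotes text (convert_quotes text)

-- ===== LEMMAS AND PROOFS =====

set_option maxRecDepth 4000

lemma modifyHead_id {α : Type} (l : List α) : l.modifyHead (fun x => x) = l := by
  cases l <;> rfl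

-- reference split of a char list at every '"'
def qsplit : List Char → List (List Char)
  | [] => [[]]
  | c :: r =>
    if c = '"' then [] :: qsplit r
    else
      match qsplit r with
      | [] => [[c]]
      | p :: ps => (c :: p) :: ps

-- the alternating TeX quote, indexed by how many quotes were seen
def texq (i : Int) : List Char := if i % 2 == 0 then ['`', '`'] else ['\'', '\'']

-- reference result of A's loop, char list level
def fref : List Char → Nat → List Char
  | [], _ => []
  | c :: r, k => if c = '"' then texq k ++ fref r (k + 1) else c :: fref r k

-- reference rejoin of the tail parts with alternating separators
def gref : List (List Char) → Int → List Char
  | [], _ => []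
  | p :: ps, i => texq i ++ p ++ gref ps (i + 1)

lemma qsplit_ne_nil (L : List Char) : qsplit L ≠ [] := by
  cases L with
  | nil => simp [qsplit]
  | cons c r =>
    simp only [qsplit]
    split_ifs
    · simp
    · cases h : qsplit r <;> simp

lemma join_nil_sep (parts : List (List Char)) :
    PySem.Chars.join [] parts = parts.flatten := by
  simp [PySem.Chars.join, List.intercalate]
  induction parts with
  | nil => simp
  | cons p ps ih => cases ps <;> simp_all [List.intersperse]

lemma texq_toList (i : Int) :
    String.toList (if i % 2 == 0 then "``" else "''") = texq i := by
  unfold texq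
  by_cases h : (i % 2 == 0) = true
  · rw [if_pos h, if_pos h]; decide
  · rw [if_neg h, if_neg h]; decide

lemma texq_toList_nat (k : Nat) :
    String.toList (if k % 2 == 0 then "``" else "''") = texq (k : Int) := by
  have : ((k : Int) % 2 == 0) = (k % 2 == 0) := by
    by_cases h : k % 2 = 0 <;> simp [h] <;> omega
  rw [← texq_toList (k : Int), this]

lemma texq_toList_nat' (k : Nat) :
    String.toList (if k % 2 = 0 then "``" else "''") = texq (k : Int) := by
  simpa using texq_toList_nat k

lemma texq_toList_dvd (i : Int) :
    String.toList (if 2 ∣ i then "``" else "''") = texq i := by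
  unfold texq
  by_cases h : 2 ∣ i
  · rw [if_pos h, if_pos (by simp; omega)]; decide
  · rw [if_neg h, if_neg (by simp; omega)]; decide

lemma foldA (L : List Char) (res : List String) (k : Nat) :
    ((L.foldl (fun (st : List String × Nat) c =>
      if c == '"' then
        (st.1 ++ [if st.2 % 2 == 0 then "``" else "''"], st.2 + 1)
      else
        (st.1 ++ [String.ofList [c]], st.2)) (res, k)).1.map String.toList).flatten
      = (res.map String.toList).flatten ++ fref L k := by
  induction L generalizing res k with
  | nil => simp [fref]
  | cons c r ih =>
    simp only [List.foldl_cons]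
    by_cases hc : c = '"'
    · have hb : (c == '"') = true := by simp [hc]
      simp only [hb, reduceIte]
      rw [ih]
      subst hc
      simp [fref, texq_toList_nat', List.append_assoc]
    · have hb : (c == '"') = false := by simp [hc]
      simp only [hb, Bool.false_eq_true, reduceIte]
      rw [ih]
      simp [fref, hc, List.append_assoc]

lemma qsplit_cons (c : Char) (r : List Char) :
    qsplit (c :: r) = if c = '"' then [] :: qsplit r
      else match qsplit r with | [] => [[c]] | p :: ps => (c :: p) :: ps := rfl

lemma fref_cons (c : Char) (r : List Char) (k : Nat) :
    fref (c :: r) k = if c = '"' then texq k ++ fref r (k + 1) else c :: fref r k := rfl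

lemma splitOn_go_quote (L : List Char) (fuel : Nat) (cur : List Char)
    (acc : List (List Char)) (h : L.length < fuel) :
    PySem.Chars.splitOn.go ['"'] fuel L cur acc
      = acc.reverse ++ (qsplit L).modifyHead (cur.reverse ++ ·) := by
  induction L generalizing fuel cur acc with
  | nil =>
    cases fuel with
    | zero => omega
    | succ f => simp [PySem.Chars.splitOn.go, qsplit]
  | cons c r ih =>
    cases fuel with
    | zero => omega
    | succ f =>
      rw [PySem.Chars.splitOn.go]
      by_cases hc : c = '"'
      · subst hc
        have hpre : List.isPrefixOf ['"'] ('"' :: r) = true := by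
          simp [List.isPrefixOf]
        simp only [hpre, if_true, List.length_cons] at *
        rw [show List.drop (([] : List Char).length + 1) ('\"' :: r) = r from rfl,
          ih f [] (cur.reverse :: acc) (by omega)]
        simp [qsplit, modifyHead_id]
      · have hpre : List.isPrefixOf ['"'] (c :: r) = false := by
          simp only [List.isPrefixOf, Bool.and_true, beq_eq_false_iff_ne, ne_eq]
          exact fun h' => hc h'.symm
        simp only [hpre, if_false, Bool.false_eq_true]
        rw [ih f (c :: cur) acc (by simpa using Nat.lt_of_succ_lt_succ h)]
        rw [qsplit_cons, if_neg hc]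
        cases hq : qsplit r with
        | nil => exact absurd hq (qsplit_ne_nil r)
        | cons p ps => simp [List.modifyHead]

lemma splitOn_quote (L : List Char) :
    PySem.Chars.splitOn L ['"'] = qsplit L := by
  rw [PySem.Chars.splitOn, splitOn_go_quote L (L.length + 1) [] [] (by omega)]
  cases hq : qsplit L with
  | nil => exact absurd hq (qsplit_ne_nil L)
  | cons p ps => simp [List.modifyHead]

lemma fref_eq_gref (L : List Char) (k : Nat) (p : List Char) (ps : List (List Char))
    (h : qsplit L = p :: ps) : fref L k = p ++ gref ps k := by
  induction L generalizing k p ps with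
  | nil =>
    simp [qsplit] at h
    simp [fref, h.1, h.2, gref]
  | cons c r ih =>
    by_cases hc : c = '"'
    · rw [qsplit_cons, if_pos hc] at h
      injection h with hp hps
      subst hp
      cases hq : qsplit r with
      | nil => exact absurd hq (qsplit_ne_nil r)
      | cons q qs =>
        rw [hq] at hps
        subst hps
        rw [fref_cons, if_pos hc, ih (k + 1) q qs hq]
        simp only [gref]
        push_cast
        simp [List.append_assoc]
    · rw [qsplit_cons, if_neg hc] at h
      cases hq : qsplit r with
      | nil => exact absurd hq (qsplit_ne_nil r)
      | cons q qs =>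
        rw [hq] at h
        injection h with hp hps
        subst hp; subst hps
        rw [fref_cons, if_neg hc, ih k q qs hq]
        simp

lemma foldB (ps : List (List Char)) (i : Int) (acc : List String) :
    (((PySem.List.enumerate (ps.map String.ofList) i).foldl
        (fun acc p => acc ++ [if p.1 % 2 == 0 then "``" else "''", p.2]) acc).map
        String.toList).flatten
      = (acc.map String.toList).flatten ++ gref ps i := by
  induction ps generalizing i acc with
  | nil => simp [gref]
  | cons p rest ih =>
    simp only [List.map_cons, PySem.List.enumerate_cons, List.foldl_cons]
    rw [ih]
    simp [gref, texq_toList_dvd, List.append_assoc]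

-- ===== VERDICT (by name: the statement is the Claim_ definition above) =====
theorem convert_quotes_spec : Claim_equal_convert_quotes := by
  intro text _
  show convert_quotes text = convert_quotes_alt text
  unfold convert_quotes convert_quotes_alt
  have hsplit : PySem.Str.split? text "\"" =
      some ((qsplit text.toList).map String.ofList) := by
    have : ("\"".toList) = ['"'] := by decide
    simp [PySem.Str.split?, PySem.Chars.split?, this, splitOn_quote]
  rw [hsplit]
  cases hq : qsplit text.toList with
  | nil => exact absurd hq (qsplit_ne_nil text.toList)
  | cons p rest =>
    simp only [Option.getD_some, List.map_cons, PySem.Str.join]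
    congr 1
    rw [show "".toList = ([] : List Char) from rfl, join_nil_sep, join_nil_sep]
    have hslice : PySem.List.slice (String.ofList p :: rest.map String.ofList)
        (some (1 : Int)) none = rest.map String.ofList := by
      rw [PySem.List.slice_from _ (by norm_num)]
      simp
    have hget : (PySem.List.pyGet? (String.ofList p :: rest.map String.ofList)
        (0 : Int)).getD "" = String.ofList p := by
      simp [PySem.List.pyGet?, PySem.List.pyIdx?]
    rw [hslice, hget, foldB rest 0 [String.ofList p]]
    rw [foldA text.toList [] 0]
    simp [fref_eq_gref text.toList 0 p rest hq]
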